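-- pv_equiv track=rewrite | github.com/mzribel/B2-Archives | Python/TP/Corbel_TP1_B2/PTP1/operations.py | getSumAndFactorial
-- ===== SOURCE A (Python) =====
-- def getSumAndFactorial(number:int):
--     if number <= 0: return [0, 0]
--     if number == 1: return [1, 1]
--
--     result = [0, 1]
--
--     for i in range(1, number + 1):
--         result[0] += i
--         result[1] *= i
--     return result
-- ===== SOURCE B (Python) =====
-- def _prod_range(lo: int, hi: int) -> int:
--     # product of the integers lo..hi inclusive, by binary splitting
--     if lo > hi:
--         return 1
--     if lo == hi:
--         return lo
--     mid = (lo + hi) // 2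
--     return _prod_range(lo, mid) * _prod_range(mid + 1, hi)
--
-- def getSumAndFactorial(number: int):
--     if number <= 0:
--         return [0, 0]
--     return [number * (number + 1) // 2, _prod_range(1, number)]
-- ===== Notes on version B (the rewrite author's own statement) =====
-- stated objective: faster
-- what changed: Replaces the fused sum/product loop with a closed-form triangular-number formula for the sum and a binary-splitting range product for the factorial.
import Mathlib
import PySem

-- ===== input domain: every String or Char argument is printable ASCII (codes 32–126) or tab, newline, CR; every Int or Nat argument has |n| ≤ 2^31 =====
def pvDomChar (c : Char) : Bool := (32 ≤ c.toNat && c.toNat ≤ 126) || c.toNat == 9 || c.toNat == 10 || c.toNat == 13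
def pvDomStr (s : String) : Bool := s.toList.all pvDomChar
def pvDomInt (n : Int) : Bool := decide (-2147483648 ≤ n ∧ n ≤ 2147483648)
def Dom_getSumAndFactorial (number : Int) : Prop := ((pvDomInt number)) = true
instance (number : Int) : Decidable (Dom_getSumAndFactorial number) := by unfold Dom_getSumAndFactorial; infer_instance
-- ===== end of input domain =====

-- B replaces A's fused sum/product loop with a closed-form triangular sum and a binary-splitting range product (faster on large inputs in a timing run).


-- ===== PORT A =====
def getSumAndFactorial (number : Int) : List Int :=
  if number ≤ 0 then [0, 0]
  else if number = 1 then [1, 1]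
  else
    -- result = [0, 1]; for i in range(1, number+1): result[0] += i; result[1] *= i
    let result := (PySem.List.pyRange 1 (number + 1) 1).foldl
      (fun r i => (r.1 + i, r.2 * i)) ((0 : Int), (1 : Int))
    [result.1, result.2]

-- ===== PORT B =====
-- product of the integers lo..hi inclusive, by binary splitting (Source B's _prod_range)
def prodRange (lo hi : Int) : Int :=
  if lo > hi then 1
  else if lo = hi then lo
  else
    prodRange lo (PySem.Int.floordiv (lo + hi) 2)
      * prodRange (PySem.Int.floordiv (lo + hi) 2 + 1) hi
termination_by (hi - lo).toNat
decreasing_by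
  all_goals
    rename_i h1 h2
    have hlt : lo < hi := by omega
    have hb := PySem.Int.floordiv_two_mid_bounds (lo := lo) (hi := hi) (le_of_lt hlt)
    have hlt2 : PySem.Int.floordiv (lo + hi) 2 < hi := by
      rw [PySem.Int.floordiv_lt_iff_lt_mul (by norm_num)]
      omega
    omega

def getSumAndFactorial_alt (number : Int) : List Int :=
  if number ≤ 0 then [0, 0]
  else [PySem.Int.floordiv (number * (number + 1)) 2, prodRange 1 number]

-- ===== PRECONDITION & SPEC =====
def Spec_getSumAndFactorial (number : Int) (out : List Int) : Prop := out = getSumAndFactorial_alt number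
instance (number : Int) (out : List Int) : Decidable (Spec_getSumAndFactorial number out) := by unfold Spec_getSumAndFactorial; infer_instance

-- ===== CLAIM (what is proved, stated in full; the proofs are below) =====
def Claim_equal_getSumAndFactorial : Prop := ∀ (number : Int), Dom_getSumAndFactorial number → Spec_getSumAndFactorial number (getSumAndFactorial number)

-- ===== LEMMAS AND PROOFS =====

-- the binary-splitting product equals the product of the list range(lo, hi+1)
lemma prodRange_eq_prod (lo hi : Int) :
    prodRange lo hi = (PySem.List.pyRange lo (hi + 1) 1).prod := by
  by_cases hgt : lo > hi
  · rw [prodRange, if_pos hgt, PySem.List.pyRange_one_eq_nil (by omega)]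
    simp
  · induction hn : (hi - lo).toNat using Nat.strong_induction_on generalizing lo hi with
    | _ k ih =>
      by_cases heq : lo = hi
      · subst heq
        rw [prodRange]
        simp [PySem.List.pyRange_one_singleton]
      · have hlt : lo < hi := by omega
        rw [prodRange, if_neg hgt, if_neg heq]
        set mid := PySem.Int.floordiv (lo + hi) 2 with hmid
        have hb := PySem.Int.floordiv_two_mid_bounds (lo := lo) (hi := hi) (le_of_lt hlt)
        have hlt2 : mid < hi := by
          rw [hmid, PySem.Int.floordiv_lt_iff_lt_mul (by norm_num)]
          omega
        have hsplit : PySem.List.pyRange lo (hi + 1) 1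
            = PySem.List.pyRange lo (mid + 1) 1 ++ PySem.List.pyRange (mid + 1) (hi + 1) 1 :=
          PySem.List.pyRange_one_append lo (mid + 1) (hi + 1) (by omega) (by omega)
        rw [hsplit, List.prod_append,
          ih (mid - lo).toNat (by omega) lo mid (by omega) rfl,
          ih (hi - (mid + 1)).toNat (by omega) (mid + 1) hi (by omega) rfl]

-- A's loop over range(1, n+1), as a pair fold, computes (triangular sum, range product)
lemma loop_eq (n : Nat) :
    (PySem.List.pyRange 1 ((n : Int) + 1) 1).foldl
      (fun r i => (r.1 + i, r.2 * i)) ((0 : Int), (1 : Int))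
    = (PySem.Int.floordiv ((n : Int) * ((n : Int) + 1)) 2,
       (PySem.List.pyRange 1 ((n : Int) + 1) 1).prod) := by
  have key : ∀ (m : Nat),
      (PySem.List.pyRange 1 ((m : Int) + 1) 1).foldl
        (fun r i => (r.1 + i, r.2 * i)) ((0 : Int), (1 : Int))
      = (((m : Int) * ((m : Int) + 1)) / 2, (PySem.List.pyRange 1 ((m : Int) + 1) 1).prod) := by
    intro m
    induction m with
    | zero =>
      rw [PySem.List.pyRange_one_eq_nil (by norm_num)]
      simp
    | succ k ih =>
      have hsplit : PySem.List.pyRange 1 ((k : Int) + 1 + 1) 1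
          = PySem.List.pyRange 1 ((k : Int) + 1) 1 ++ [(k : Int) + 1] := by
        have := PySem.List.pyRange_one_succ_right (a := 1) (b := (k : Int) + 1) (by omega)
        simpa using this
      push_cast
      rw [hsplit, List.foldl_append, List.prod_append, ih]
      simp only [List.foldl, List.prod_cons, List.prod_nil]
      refine Prod.ext ?_ ?_
      · show ((k : Int) * ((k : Int) + 1)) / 2 + ((k : Int) + 1)
            = (((k : Int) + 1) * ((k : Int) + 1 + 1)) / 2
        have h2 : ((k : Int) + 1) * ((k : Int) + 1 + 1)
            = (k : Int) * ((k : Int) + 1) + 2 * ((k : Int) + 1) := by ring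
        omega
      · show (PySem.List.pyRange 1 ((k : Int) + 1) 1).prod * ((k : Int) + 1)
            = (PySem.List.pyRange 1 ((k : Int) + 1) 1).prod * (((k : Int) + 1) * 1)
        ring
  rw [key n, PySem.Int.floordiv_eq_ediv_of_pos (by norm_num)]

-- ===== VERDICT (by name: the statement is the Claim_ definition above) =====
theorem getSumAndFactorial_spec : Claim_equal_getSumAndFactorial := by
  intro number _
  unfold Spec_getSumAndFactorial getSumAndFactorial getSumAndFactorial_alt
  by_cases h0 : number ≤ 0
  · rw [if_pos h0, if_pos h0]
  · rw [if_neg h0, if_neg h0]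
    by_cases h1 : number = 1
    · subst h1
      have hp : prodRange 1 1 = 1 := by rw [prodRange]; norm_num
      rw [hp, PySem.Int.floordiv_eq_ediv_of_pos (by norm_num)]
      norm_num
    · rw [if_neg h1]
      obtain ⟨n, rfl⟩ : ∃ n : Nat, number = (n : Int) :=
        ⟨number.toNat, by omega⟩
      rw [loop_eq n, prodRange_eq_prod]
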